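-- pv_equiv track=rewrite | github.com/nickpinecone/backend-lab | algorithms/lab3/task8.py | solve
-- ===== SOURCE A (Python) =====
-- def solve(text):
--     star_comments = 0
--     curly_comments = 0
--     inline_comments = 0
--     literal_strings = 0
--
--     i = 0
--     length = len(text)
--
--     while i < length:
--         if i + 1 < length and text[i] == "(" and text[i + 1] == "*":
--             star_comments += 1
--             i += 2
--             while i + 1 < length and not (text[i] == "*" and text[i + 1] == ")"):
--                 i += 1
--             i += 2
--
--         elif text[i] == "{":
--             curly_comments += 1
--             i += 1
--             while i < length and text[i] != "}":
--                 i += 1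
--             i += 1
--
--         elif i + 1 < length and text[i] == "/" and text[i + 1] == "/":
--             inline_comments += 1
--             i += 2
--             while i < length and text[i] != "\n":
--                 i += 1
--
--         elif text[i] == "'":
--             literal_strings += 1
--             i += 1
--             while i < length and text[i] != "'":
--                 i += 1
--             i += 1
--
--         else:
--             i += 1
--
--     return {
--         "first": star_comments,
--         "second": curly_comments,
--         "third": inline_comments,
--         "fourth": literal_strings,
--     }
-- ===== SOURCE B (Python) =====
-- # Character-at-a-time finite state machine: a pure transition function over
-- # eight states replaces A's index arithmetic and nested skip loops.
--
-- CODE, PAREN, SLASH, STAR, STAR2, CURLY, LINE, QUOTE = range(8)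
--
--
-- def _dispatch(ch):
--     """Transition taken from plain code on character ch."""
--     if ch == "(":
--         return PAREN, None
--     if ch == "{":
--         return CURLY, "second"
--     if ch == "/":
--         return SLASH, None
--     if ch == "'":
--         return QUOTE, "fourth"
--     return CODE, None
--
--
-- def _step(state, ch):
--     """One DFA step: next state plus the construct opened here, if any."""
--     if state == CODE:
--         return _dispatch(ch)
--     if state == PAREN:
--         if ch == "*":
--             return STAR, "first"
--         return _dispatch(ch)
--     if state == SLASH:
--         if ch == "/":
--             return LINE, "third"
--         return _dispatch(ch)
--     if state == STAR:
--         return (STAR2 if ch == "*" else STAR), None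
--     if state == STAR2:
--         if ch == ")":
--             return CODE, None
--         return (STAR2 if ch == "*" else STAR), None
--     if state == CURLY:
--         return (CODE if ch == "}" else CURLY), None
--     if state == LINE:
--         return (CODE if ch == "\n" else LINE), None
--     # QUOTE
--     return (CODE if ch == "'" else QUOTE), None
--
--
-- def solve(text):
--     counts = {"first": 0, "second": 0, "third": 0, "fourth": 0}
--     state = CODE
--     for ch in text:
--         state, opened = _step(state, ch)
--         if opened is not None:
--             counts[opened] += 1
--     return counts
-- ===== Notes on version B (the rewrite author's own statement) =====
-- stated objective: alternative
-- what changed: Replaced A's index scanner with lookahead and four nested skip-to-delimiter loops by a single character-at-a-time finite state machine: an eight-state pure transition function folded once over the text, incrementing a count whenever a construct-opening transition fires.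
import Mathlib
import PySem

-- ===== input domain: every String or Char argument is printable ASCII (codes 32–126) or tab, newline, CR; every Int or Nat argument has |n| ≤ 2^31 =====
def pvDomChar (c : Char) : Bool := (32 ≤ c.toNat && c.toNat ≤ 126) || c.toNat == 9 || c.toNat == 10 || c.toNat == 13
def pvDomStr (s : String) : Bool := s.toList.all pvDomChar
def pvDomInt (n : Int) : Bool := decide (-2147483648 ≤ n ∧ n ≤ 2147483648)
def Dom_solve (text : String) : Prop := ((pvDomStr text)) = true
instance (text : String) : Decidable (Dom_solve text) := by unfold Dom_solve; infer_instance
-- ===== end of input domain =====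

-- B replaces A's index scanner (lookahead tests plus four nested skip loops) by a
-- character-at-a-time finite state machine folded once over the text; objective:
-- alternative (same values, no speed claim).

-- ===== PORT A =====
-- inner while of the star branch: 'while i+1 < length and not (text[i]=="*" and text[i+1]==")")'
def starScanA : List Char → List Char
  | a :: b :: t => if a = '*' ∧ b = ')' then a :: b :: t else starScanA (b :: t)
  | l => l

theorem starScanA_length_le (l : List Char) : (starScanA l).length ≤ l.length := by
  induction l with
  | nil => simp [starScanA]
  | cons a t ih =>
    cases t with
    | nil => simp [starScanA]
    | cons b t' =>
      rw [starScanA]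
      split
      · exact le_refl _
      · exact le_trans ih (by simp)

-- transliteration of A's while loop: state = remaining text + the four counters
def loopA (l : List Char) (a b c d : Int) : List (String × Int) :=
  match l with
  | [] => [("first", a), ("second", b), ("third", c), ("fourth", d)]
  | x :: rest =>
    if x = '(' ∧ rest.head? = some '*' then
      loopA ((starScanA rest.tail).drop 2) (a + 1) b c d
    else if x = '{' then
      loopA ((rest.dropWhile (· ≠ '}')).drop 1) a (b + 1) c d
    else if x = '/' ∧ rest.head? = some '/' then
      loopA (rest.tail.dropWhile (· ≠ '\n')) a b (c + 1) d
    else if x = '\'' then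
      loopA ((rest.dropWhile (· ≠ '\'')).drop 1) a b c (d + 1)
    else loopA rest a b c d
  termination_by l.length
  decreasing_by
  · simp only [List.length_cons]
    have h1 := starScanA_length_le rest.tail
    have h2 : rest.tail.length ≤ rest.length := by cases rest <;> simp
    have hD : ((starScanA rest.tail).drop 2).length = (starScanA rest.tail).length - 2 := List.length_drop
    omega
  · have := List.length_dropWhile_le (fun c => decide (c ≠ '}')) rest
    have hD : ((rest.dropWhile (· ≠ '}')).drop 1).length = (rest.dropWhile (· ≠ '}')).length - 1 := List.length_drop
    simp only [List.length_cons]; omega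
  · have := List.length_dropWhile_le (fun c => decide (c ≠ '\n')) rest.tail
    have : rest.tail.length ≤ rest.length := by cases rest <;> simp
    simp only [List.length_cons]
    have := List.length_dropWhile_le (fun c => decide (c ≠ '\n')) rest.tail
    omega
  · have := List.length_dropWhile_le (fun c => decide (c ≠ '\'')) rest
    have hD : ((rest.dropWhile (· ≠ '\'')).drop 1).length = (rest.dropWhile (· ≠ '\'')).length - 1 := List.length_drop
    simp only [List.length_cons]; omega
  · simp

def solve (text : String) : List (String × Int) :=
  loopA text.toList 0 0 0 0

-- ===== PORT B =====
-- the eight DFA states of Source B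
inductive PvSt
  | code | paren | slash | star | star2 | curly | line | quote
  deriving DecidableEq, Repr

-- _dispatch of Source B: transition taken from plain code
def dispatchB (ch : Char) : PvSt × Option String :=
  if ch = '(' then (PvSt.paren, none)
  else if ch = '{' then (PvSt.curly, some "second")
  else if ch = '/' then (PvSt.slash, none)
  else if ch = '\'' then (PvSt.quote, some "fourth")
  else (PvSt.code, none)

-- _step of Source B: one DFA step, next state plus the construct opened here (if any)
def stepB (state : PvSt) (ch : Char) : PvSt × Option String :=
  match state with
  | PvSt.code => dispatchB ch
  | PvSt.paren => if ch = '*' then (PvSt.star, some "first") else dispatchB ch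
  | PvSt.slash => if ch = '/' then (PvSt.line, some "third") else dispatchB ch
  | PvSt.star => (if ch = '*' then PvSt.star2 else PvSt.star, none)
  | PvSt.star2 =>
      if ch = ')' then (PvSt.code, none)
      else (if ch = '*' then PvSt.star2 else PvSt.star, none)
  | PvSt.curly => (if ch = '}' then PvSt.code else PvSt.curly, none)
  | PvSt.line => (if ch = '\n' then PvSt.code else PvSt.line, none)
  | PvSt.quote => (if ch = '\'' then PvSt.code else PvSt.quote, none)

-- the loop body of Source B's solve: advance the state, bump the opened construct's count
def foldB (st : PvSt × PySem.Dict String Int) (ch : Char) : PvSt × PySem.Dict String Int :=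
  let (s', opened) := stepB st.1 ch
  match opened with
  | some k => (s', PySem.Dict.modify st.2 k 0 (· + 1))
  | none => (s', st.2)

def solve_alt (text : String) : List (String × Int) :=
  (text.toList.foldl foldB
    (PvSt.code,
      PySem.Dict.ofList [("first", 0), ("second", 0), ("third", 0), ("fourth", 0)])).2.items

-- ===== PRECONDITION & SPEC =====
def Spec_solve (text : String) (out : List (String × Int)) : Prop := out = solve_alt text
instance (text : String) (out : List (String × Int)) : Decidable (Spec_solve text out) := by unfold Spec_solve; infer_instance

-- ===== CLAIM (what is proved, stated in full; the proofs are below) =====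
def Claim_equal_solve : Prop := ∀ (text : String), Dom_solve text → Spec_solve text (solve text)

-- ===== LEMMAS AND PROOFS =====

-- entering paren/slash and falling through is the same as dispatching from code
theorem foldB_paren (m : List Char) (d : PySem.Dict String Int)
    (h : m.head? ≠ some '*') :
    (m.foldl foldB (PvSt.paren, d)).2 = (m.foldl foldB (PvSt.code, d)).2 := by
  cases m with
  | nil => rfl
  | cons x t =>
    have hx : x ≠ '*' := by simpa using h
    simp [List.foldl_cons, foldB, stepB, hx]

theorem foldB_slash (m : List Char) (d : PySem.Dict String Int)
    (h : m.head? ≠ some '/') :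
    (m.foldl foldB (PvSt.slash, d)).2 = (m.foldl foldB (PvSt.code, d)).2 := by
  cases m with
  | nil => rfl
  | cons x t =>
    have hx : x ≠ '/' := by simpa using h
    simp [List.foldl_cons, foldB, stepB, hx]

-- the curly state consumes up to and including the first '}'
theorem foldB_curly (m : List Char) (d : PySem.Dict String Int) :
    (m.foldl foldB (PvSt.curly, d)).2 =
      (((m.dropWhile (· ≠ '}')).drop 1).foldl foldB (PvSt.code, d)).2 := by
  induction m generalizing d with
  | nil => rfl
  | cons x t ih =>
    by_cases hx : x = '}'
    · subst hx; simp [List.foldl_cons, foldB, stepB]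
    · simp only [List.foldl_cons, List.dropWhile_cons]
      rw [show foldB (PvSt.curly, d) x = (PvSt.curly, d) by simp [foldB, stepB, hx]]
      rw [if_pos (by simpa using hx)]
      exact ih d

-- the quote state consumes up to and including the closing quote
theorem foldB_quote (m : List Char) (d : PySem.Dict String Int) :
    (m.foldl foldB (PvSt.quote, d)).2 =
      (((m.dropWhile (· ≠ '\'')).drop 1).foldl foldB (PvSt.code, d)).2 := by
  induction m generalizing d with
  | nil => rfl
  | cons x t ih =>
    by_cases hx : x = '\''
    · subst hx; simp [List.foldl_cons, foldB, stepB]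
    · simp only [List.foldl_cons, List.dropWhile_cons]
      rw [show foldB (PvSt.quote, d) x = (PvSt.quote, d) by simp [foldB, stepB, hx]]
      rw [if_pos (by simpa using hx)]
      exact ih d

-- the line state consumes up to (and the code state then eats) the newline
theorem foldB_line (m : List Char) (d : PySem.Dict String Int) :
    (m.foldl foldB (PvSt.line, d)).2 =
      ((m.dropWhile (· ≠ '\n')).foldl foldB (PvSt.code, d)).2 := by
  induction m generalizing d with
  | nil => rfl
  | cons x t ih =>
    by_cases hx : x = '\n'
    · subst hx; simp [List.foldl_cons, foldB, stepB, dispatchB]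
    · simp only [List.foldl_cons, List.dropWhile_cons]
      rw [show foldB (PvSt.line, d) x = (PvSt.line, d) by simp [foldB, stepB, hx]]
      rw [if_pos (by simpa using hx)]
      exact ih d

-- the star states consume exactly what A's '*)' scanner skips
theorem foldB_star (m : List Char) (d : PySem.Dict String Int) :
    (m.foldl foldB (PvSt.star, d)).2 =
      (((starScanA m).drop 2).foldl foldB (PvSt.code, d)).2 := by
  induction m generalizing d with
  | nil => rfl
  | cons x t ih =>
    by_cases hx : x = '*'
    · subst hx
      cases t with
      | nil => simp [starScanA, List.foldl_cons, foldB, stepB]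
      | cons b t' =>
        by_cases hb : b = ')'
        · subst hb
          simp [starScanA, List.foldl_cons, foldB, stepB]
        · have hstep :
              ((b :: t').foldl foldB (PvSt.star2, d)).2 =
                ((b :: t').foldl foldB (PvSt.star, d)).2 := by
            have hbne : ¬ b = ')' := hb
            simp [List.foldl_cons, foldB, stepB, hbne]
        -- '*' not followed by ')': scanner moves on, DFA behaves as star again
          rw [starScanA, if_neg (by simp [hb])]
          calc ((('*' :: b :: t').foldl foldB (PvSt.star, d))).2
              = ((b :: t').foldl foldB (PvSt.star2, d)).2 := by
                simp [List.foldl_cons, foldB, stepB]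
            _ = ((b :: t').foldl foldB (PvSt.star, d)).2 := hstep
            _ = (((starScanA (b :: t')).drop 2).foldl foldB (PvSt.code, d)).2 := ih d
    · have hscan : (starScanA (x :: t)).drop 2 = (starScanA t).drop 2 := by
        cases t with
        | nil => simp [starScanA]
        | cons b t' => rw [starScanA, if_neg (by simp [hx])]
      rw [hscan]
      simp only [List.foldl_cons]
      rw [show foldB (PvSt.star, d) x = (PvSt.star, d) by simp [foldB, stepB, hx]]
      exact ih d

-- main invariant: A's loop from counters (a,b,c,d) = B's fold from code state
-- over the 4-entry dict carrying those counters
theorem loopA_eq_foldB : ∀ (n : Nat) (l : List Char), l.length ≤ n →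
    ∀ (a b c d : Int),
      loopA l a b c d =
        (l.foldl foldB
          (PvSt.code,
            PySem.Dict.mk [("first", a), ("second", b), ("third", c), ("fourth", d)])).2.items := by
  intro n
  induction n with
  | zero =>
    intro l hl a b c d
    have : l = [] := List.length_eq_zero_iff.mp (Nat.le_zero.mp hl)
    subst this
    simp [loopA]
  | succ n ih =>
    intro l hl a b c d
    cases l with
    | nil => simp [loopA]
    | cons x rest =>
      rw [loopA]
      simp only [List.length_cons] at hl
      by_cases h1 : x = '(' ∧ rest.head? = some '*'
      · obtain ⟨hx, hh⟩ := h1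
        subst hx
        obtain ⟨t, ht⟩ : ∃ t, rest = '*' :: t := by
          cases rest with
          | nil => simp at hh
          | cons y t => exact ⟨t, by simp at hh; simp [hh]⟩
        subst ht
        rw [if_pos ⟨rfl, rfl⟩]
        have hlen : ((starScanA t).drop 2).length ≤ n := by
          have h1' := starScanA_length_le t
          have hD : ((starScanA t).drop 2).length = (starScanA t).length - 2 := List.length_drop
          simp only [List.length_cons] at hl
          omega
        simp only [List.tail_cons]
        rw [ih _ hlen, ← foldB_star t]
        simp [List.foldl_cons, foldB, stepB, dispatchB, PySem.Dict.modify, PySem.Dict.insert, PySem.Dict.getD, PySem.Dict.get?]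
      · rw [if_neg h1]
        by_cases h2 : x = '{'
        · subst h2
          rw [if_pos rfl]
          have hlen : ((rest.dropWhile (· ≠ '}')).drop 1).length ≤ n := by
            have := List.length_dropWhile_le (fun c => decide (c ≠ '}')) rest
            have hD : ((rest.dropWhile (· ≠ '}')).drop 1).length = (rest.dropWhile (· ≠ '}')).length - 1 := List.length_drop
            omega
          rw [ih _ hlen, ← foldB_curly rest]
          simp [List.foldl_cons, foldB, stepB, dispatchB, PySem.Dict.modify, PySem.Dict.insert, PySem.Dict.getD, PySem.Dict.get?]
        · rw [if_neg h2]
          by_cases h3 : x = '/' ∧ rest.head? = some '/'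
          · obtain ⟨hx, hh⟩ := h3
            subst hx
            obtain ⟨t, ht⟩ : ∃ t, rest = '/' :: t := by
              cases rest with
              | nil => simp at hh
              | cons y t => exact ⟨t, by simp at hh; simp [hh]⟩
            subst ht
            rw [if_pos ⟨rfl, rfl⟩]
            have hlen : (List.dropWhile (· ≠ '\n') t).length ≤ n := by
              have := List.length_dropWhile_le (fun c => decide (c ≠ '\n')) t
              simp only [List.length_cons] at hl
              omega
            simp only [List.tail_cons]
            rw [ih _ hlen, ← foldB_line t]
            simp [List.foldl_cons, foldB, stepB, dispatchB, PySem.Dict.modify, PySem.Dict.insert, PySem.Dict.getD, PySem.Dict.get?]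
          · rw [if_neg h3]
            by_cases h4 : x = '\''
            · subst h4
              rw [if_pos rfl]
              have hlen : ((rest.dropWhile (· ≠ '\'')).drop 1).length ≤ n := by
                have := List.length_dropWhile_le (fun c => decide (c ≠ '\'')) rest
                have hD : ((rest.dropWhile (· ≠ '\'')).drop 1).length = (rest.dropWhile (· ≠ '\'')).length - 1 := List.length_drop
                omega
              rw [ih _ hlen, ← foldB_quote rest]
              simp [List.foldl_cons, foldB, stepB, dispatchB, PySem.Dict.modify, PySem.Dict.insert, PySem.Dict.getD, PySem.Dict.get?]
            · rw [if_neg h4]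
              rw [ih rest (by omega)]
              by_cases hp : x = '('
              · subst hp
                have hh : rest.head? ≠ some '*' := fun hc => h1 ⟨rfl, hc⟩
                rw [← foldB_paren rest _ hh]
                simp [List.foldl_cons, foldB, stepB, dispatchB]
              · by_cases hs : x = '/'
                · subst hs
                  have hh : rest.head? ≠ some '/' := fun hc => h3 ⟨rfl, hc⟩
                  rw [← foldB_slash rest _ hh]
                  simp [List.foldl_cons, foldB, stepB, dispatchB]
                · simp only [List.foldl_cons]
                  rw [show foldB (PvSt.code, PySem.Dict.mk [("first", a), ("second", b), ("third", c), ("fourth", d)]) x = (PvSt.code, PySem.Dict.mk [("first", a), ("second", b), ("third", c), ("fourth", d)]) by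
                    simp [foldB, stepB, dispatchB, hp, h2, hs, h4]]

-- ===== VERDICT (by name: the statement is the Claim_ definition above) =====
theorem solve_spec : Claim_equal_solve := by
  intro text _
  unfold Spec_solve solve solve_alt
  exact loopA_eq_foldB text.toList.length text.toList le_rfl 0 0 0 0
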